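-- pv_equiv track=rewrite | github.com/CQuinn8/HLS_phenometrics_maap | phenometric_algorithm.py | _make_worker_slices
-- ===== SOURCE A (Python) =====
-- def _make_worker_slices(ny: int, n_workers: int) -> list[tuple[int, int]]:
--     """
--     Divide ny rows into exactly n_workers contiguous slices as evenly
--     as possible. One slice per worker minimises joblib dispatch overhead.
--     """
--     base, extra = divmod(ny, n_workers)
--     slices, start = [], 0
--     for i in range(n_workers):
--         end = start + base + (1 if i < extra else 0)
--         if start < end:
--             slices.append((start, end))
--         start = end
--     return slices
-- ===== SOURCE B (Python) =====
-- def _make_worker_slices(ny: int, n_workers: int) -> list[tuple[int, int]]: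
--     """Closed-form boundary table instead of a running accumulator."""
--     base, extra = divmod(ny, n_workers)
--     bounds = [i * base + min(i, extra) for i in range(n_workers + 1)]
--     return [(s, e) for s, e in zip(bounds, bounds[1:]) if s < e]
-- ===== Notes on version B (the rewrite author's own statement) =====
-- stated objective: alternative
-- what changed: Replaces the sequential start-accumulator loop with a closed-form boundary table bounds[i] = i*base + min(i, extra) and a separate pairwise zip-and-filter pass.
import Mathlib
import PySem

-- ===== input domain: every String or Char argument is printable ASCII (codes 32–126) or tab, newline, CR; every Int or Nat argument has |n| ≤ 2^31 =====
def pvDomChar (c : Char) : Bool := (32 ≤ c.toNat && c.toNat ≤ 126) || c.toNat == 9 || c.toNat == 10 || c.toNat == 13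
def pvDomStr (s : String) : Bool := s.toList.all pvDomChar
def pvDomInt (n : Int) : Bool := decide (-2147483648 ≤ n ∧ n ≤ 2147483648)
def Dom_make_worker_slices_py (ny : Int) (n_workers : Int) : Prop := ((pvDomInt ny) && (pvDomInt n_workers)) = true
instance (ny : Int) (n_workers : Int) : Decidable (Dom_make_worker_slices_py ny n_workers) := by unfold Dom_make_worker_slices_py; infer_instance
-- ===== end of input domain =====

-- B replaces A's running-start accumulator loop by a closed-form boundary table and a
-- pairwise zip-and-filter pass; same O(n_workers) cost (objective: alternative).

-- ===== PORT A =====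
-- accumulator loop: state = (slices built so far, current start)
def make_worker_slices_py (ny : Int) (n_workers : Int) : List (Int × Int) :=
  match PySem.Int.divmod? ny n_workers with
  | none => []   -- ZeroDivisionError; excluded by Pre_
  | some (base, extra) =>
    ((PySem.List.pyRange 0 n_workers 1).foldl
      (fun (st : List (Int × Int) × Int) (i : Int) =>
        let e := st.2 + base + (if i < extra then 1 else 0)
        (if st.2 < e then st.1 ++ [(st.2, e)] else st.1, e))
      ([], 0)).1

-- ===== PORT B =====
-- tail-recursive zip (exact = Python's zip / List.zip; stack-safe for evaluation)
def pvZipGo {α β : Type} (acc : List (α × β)) : List α → List β → List (α × β)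
  | x :: xs, y :: ys => pvZipGo ((x, y) :: acc) xs ys
  | _, _ => acc.reverse

def pvZip {α β : Type} (xs : List α) (ys : List β) : List (α × β) := pvZipGo [] xs ys

-- closed-form boundary table, then pairwise zip + filter
def make_worker_slices_py_alt (ny : Int) (n_workers : Int) : List (Int × Int) :=
  match PySem.Int.divmod? ny n_workers with
  | none => []   -- ZeroDivisionError; excluded by Pre_
  | some (base, extra) =>
    let bounds := (PySem.List.pyRange 0 (n_workers + 1) 1).map (fun i => i * base + min i extra)
    (pvZip bounds bounds.tail).filter (fun p => decide (p.1 < p.2))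

-- ===== PRECONDITION & SPEC =====
-- Pre_ excludes exactly n_workers = 0, where A (and B) raise ZeroDivisionError in divmod.
def Pre_make_worker_slices_py (ny : Int) (n_workers : Int) : Prop := n_workers ≠ 0
instance (ny : Int) (n_workers : Int) : Decidable (Pre_make_worker_slices_py ny n_workers) := by unfold Pre_make_worker_slices_py; infer_instance
def pvWitness_make_worker_slices_py : Int × Int := (10, 3)

def Spec_make_worker_slices_py (ny : Int) (n_workers : Int) (out : List (Int × Int)) : Prop := out = make_worker_slices_py_alt ny n_workers
instance (ny : Int) (n_workers : Int) (out : List (Int × Int)) : Decidable (Spec_make_worker_slices_py ny n_workers out) := by unfold Spec_make_worker_slices_py; infer_instance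

-- ===== CLAIM (what is proved, stated in full; the proofs are below) =====
def Claim_equal_make_worker_slices_py : Prop := ∀ (ny : Int) (n_workers : Int), Dom_make_worker_slices_py ny n_workers → Pre_make_worker_slices_py ny n_workers → Spec_make_worker_slices_py ny n_workers (make_worker_slices_py ny n_workers)

-- ===== LEMMAS AND PROOFS =====

-- the closed-form boundary: pvBound base extra k = k*base + min k extra
def pvBound (base extra : Int) (k : Nat) : Int := (k : Int) * base + min (k : Int) extra

lemma pvBound_zero (base extra : Int) (hextra : 0 ≤ extra) : pvBound base extra 0 = 0 := by
  simp [pvBound]; omega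

lemma pvBound_succ (base extra : Int) (k : Nat) :
    pvBound base extra (k + 1) = pvBound base extra k + base + (if (k : Int) < extra then 1 else 0) := by
  unfold pvBound
  push_cast
  have hb : ((k : Int) + 1) * base = (k : Int) * base + base := by ring
  split_ifs with h <;> omega

-- A's accumulator fold over range k produces the filtered boundary pairs and ends at pvBound k
lemma foldA (base extra : Int) (hextra : 0 ≤ extra) (k : Nat) :
    (List.range k).foldl
      (fun (st : List (Int × Int) × Int) (j : Nat) =>
        let e := st.2 + base + (if (j : Int) < extra then 1 else 0)
        (if st.2 < e then st.1 ++ [(st.2, e)] else st.1, e))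
      ([], 0)
    = (((List.range k).map (fun j => (pvBound base extra j, pvBound base extra (j + 1)))).filter
        (fun p => decide (p.1 < p.2)),
       pvBound base extra k) := by
  induction k with
  | zero => simp [pvBound_zero base extra hextra]
  | succ n ih =>
    rw [List.range_succ, List.foldl_append, ih, List.map_append, List.filter_append]
    have hs := pvBound_succ base extra n
    simp only [List.foldl_cons, List.foldl_nil, ← hs]
    by_cases h : pvBound base extra n < pvBound base extra (n + 1) <;> simp [h]

lemma pvZipGo_eq {α β : Type} : ∀ (xs : List α) (ys : List β) (acc : List (α × β)),
    pvZipGo acc xs ys = acc.reverse ++ xs.zip ys := by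
  intro xs
  induction xs with
  | nil => intro ys acc; cases ys <;> simp [pvZipGo]
  | cons x xs ih =>
    intro ys acc
    cases ys with
    | nil => simp [pvZipGo]
    | cons y ys => simp [pvZipGo, ih]

lemma pvZip_eq_zip {α β : Type} (xs : List α) (ys : List β) : pvZip xs ys = xs.zip ys := by
  simp [pvZip, pvZipGo_eq]

-- zip of consecutive elements of a mapped range
lemma zip_cons_range (n : Nat) : ∀ g : Nat → Int,
    ((g 0 :: (List.range n).map (fun i => g (i + 1))).zip ((List.range n).map (fun i => g (i + 1))))
    = (List.range n).map (fun i => (g i, g (i + 1))) := by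
  induction n with
  | zero => intro g; simp
  | succ m ih =>
    intro g
    rw [List.range_succ_eq_map]
    simp only [List.map_cons, List.map_map]
    have := ih (fun i => g (i + 1))
    simp only [List.map_map] at this
    rw [List.zip_cons_cons]
    have harg : ((fun i => g (i + 1)) ∘ Nat.succ) = (fun i => g (i + 1 + 1)) := by
      funext i; simp [Function.comp, Nat.succ_eq_add_one]
    have harg2 : ((fun i => (g i, g (i + 1))) ∘ Nat.succ) = (fun i => (g (i + 1), g (i + 1 + 1))) := by
      funext i; simp [Function.comp, Nat.succ_eq_add_one]
    rw [harg, harg2, ← this]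

lemma zip_map_range (n : Nat) (g : Nat → Int) :
    (((List.range (n + 1)).map g).zip ((List.range (n + 1)).map g).tail)
    = (List.range n).map (fun i => (g i, g (i + 1))) := by
  rw [List.range_succ_eq_map]
  simp only [List.map_cons, List.map_map, List.tail_cons]
  have harg : (g ∘ Nat.succ) = (fun i => g (i + 1)) := by
    funext i; simp [Function.comp, Nat.succ_eq_add_one]
  rw [harg, zip_cons_range n g]

-- ===== VERDICT (by name: the statement is the Claim_ definition above) =====
theorem make_worker_slices_py_spec : Claim_equal_make_worker_slices_py := by
  intro ny nw _ hpre
  unfold Pre_make_worker_slices_py at hpre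
  unfold Spec_make_worker_slices_py make_worker_slices_py make_worker_slices_py_alt
  have hdm : PySem.Int.divmod? ny nw = some (PySem.Int.floordiv ny nw, PySem.Int.mod ny nw) := by
    simp [PySem.Int.divmod?, PySem.Int.floordiv, PySem.Int.mod, hpre]
  rw [hdm]
  dsimp only
  by_cases hpos : 0 < nw
  · -- positive worker count
    set base := PySem.Int.floordiv ny nw with hbase
    set extra := PySem.Int.mod ny nw with hextra
    have hex : 0 ≤ extra := PySem.Int.mod_nonneg ny hpos
    obtain ⟨n, hn⟩ : ∃ n : Nat, nw = (n : Int) + 1 := ⟨(nw - 1).toNat, by omega⟩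
    -- A side
    have hrA : PySem.List.pyRange 0 nw 1 = (List.range (n + 1)).map (fun k : Nat => (k : Int)) := by
      rw [PySem.List.pyRange_one]
      have : (nw - 0).toNat = n + 1 := by omega
      rw [this]; simp
    have hrB : PySem.List.pyRange 0 (nw + 1) 1 = (List.range (n + 2)).map (fun k : Nat => (k : Int)) := by
      rw [PySem.List.pyRange_one]
      have : (nw + 1 - 0).toNat = n + 2 := by omega
      rw [this]; simp
    rw [hrA, hrB, List.foldl_map, List.map_map, pvZip_eq_zip]
    have hgb : ((fun i : Int => i * base + min i extra) ∘ (fun k : Nat => (k : Int)))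
        = pvBound base extra := by
      funext k; simp [Function.comp, pvBound]
    rw [hgb, zip_map_range (n + 1) (pvBound base extra), foldA base extra hex (n + 1)]
  · -- negative worker count: both ranges empty
    have h1 : PySem.List.pyRange 0 nw 1 = [] := PySem.List.pyRange_one_eq_nil (by omega)
    have h2 : PySem.List.pyRange 0 (nw + 1) 1 = [] := PySem.List.pyRange_one_eq_nil (by omega)
    rw [h1, h2]; simp [pvZip, pvZipGo]
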